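-- pv_equiv track=rewrite | github.com/Harsha-Hegde-2005/bmtc-commuter-survey | temp2.py | bmtc_fare
-- ===== SOURCE A (Python) =====
-- def bmtc_fare(distance):
--     slabs = [(2,6),(4,12),(6,18),(8,23),(10,23),(12,24),
--              (14,24),(16,28),(18,28),(20,28),(22,30),
--              (24,30),(26,30),(28,30),(30,30)]
--     for d,f in slabs:
--         if distance <= d:
--             return f
--     return 32
-- ===== SOURCE B (Python) =====
-- def bmtc_fare(distance):
--     thresholds = [2, 4, 6, 8, 10, 12, 14, 16, 18, 20, 22, 24, 26, 28, 30]
--     fares = [6, 12, 18, 23, 23, 24, 24, 28, 28, 28, 30, 30, 30, 30, 30]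
--     # hand-written bisect_left (A imports no modules, so none are used here)
--     lo, hi = 0, len(thresholds)
--     while lo < hi:
--         mid = (lo + hi) // 2
--         if thresholds[mid] < distance:
--             lo = mid + 1
--         else:
--             hi = mid
--     return fares[lo] if lo < len(fares) else 32
-- ===== Notes on version B (the rewrite author's own statement) =====
-- stated objective: alternative
-- what changed: Replaced the sequential scan over (bound, fare) slab pairs with a binary search (hand-written bisect_left) over a threshold table indexing a parallel fares table.
import Mathlib
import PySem

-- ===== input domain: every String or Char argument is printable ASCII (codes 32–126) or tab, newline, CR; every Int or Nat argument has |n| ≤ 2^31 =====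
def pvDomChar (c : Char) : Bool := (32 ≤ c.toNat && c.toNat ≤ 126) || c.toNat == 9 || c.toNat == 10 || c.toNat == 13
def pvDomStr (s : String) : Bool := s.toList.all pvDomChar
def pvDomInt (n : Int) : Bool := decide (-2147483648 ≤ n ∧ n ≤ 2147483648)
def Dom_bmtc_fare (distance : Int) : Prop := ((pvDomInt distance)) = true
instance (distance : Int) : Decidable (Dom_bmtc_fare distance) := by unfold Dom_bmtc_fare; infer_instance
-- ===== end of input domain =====

-- B replaces A's sequential slab scan with a binary search over a threshold table; alternative structure, same values.

-- ===== PORT A =====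
-- A's for-loop over the slab pairs: the first pair with distance ≤ d yields f, else 32.
def fareLoop : List (Int × Int) → Int → Int
  | [], _ => 32
  | (d, f) :: rest, x => if x ≤ d then f else fareLoop rest x

def bmtc_fare (distance : Int) : Int :=
  fareLoop [(2,6),(4,12),(6,18),(8,23),(10,23),(12,24),
            (14,24),(16,28),(18,28),(20,28),(22,30),
            (24,30),(26,30),(28,30),(30,30)] distance

-- ===== PORT B =====
-- B's hand-written bisect_left while-loop (lo, hi stay natural numbers; (lo+hi)//2 is Nat division here, exact for Python's // on nonnegatives).
def bisectLoop (a : List Int) (x : Int) (lo hi : Nat) : Nat :=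
  if h : lo < hi then
    let mid := (lo + hi) / 2
    if a.getD mid 0 < x then bisectLoop a x (mid + 1) hi else bisectLoop a x lo mid
  else lo
termination_by hi - lo
decreasing_by all_goals omega

def bmtc_fare_alt (distance : Int) : Int :=
  let thresholds : List Int := [2, 4, 6, 8, 10, 12, 14, 16, 18, 20, 22, 24, 26, 28, 30]
  let fares : List Int := [6, 12, 18, 23, 23, 24, 24, 28, 28, 28, 30, 30, 30, 30, 30]
  let lo := bisectLoop thresholds distance 0 thresholds.length
  if lo < fares.length then fares.getD lo 0 else 32

-- ===== PRECONDITION & SPEC =====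
def Spec_bmtc_fare (distance : Int) (out : Int) : Prop := out = bmtc_fare_alt distance
instance (distance : Int) (out : Int) : Decidable (Spec_bmtc_fare distance out) := by unfold Spec_bmtc_fare; infer_instance

-- ===== CLAIM (what is proved, stated in full; the proofs are below) =====
def Claim_equal_bmtc_fare : Prop := ∀ (distance : Int), Dom_bmtc_fare distance → Spec_bmtc_fare distance (bmtc_fare distance)

-- ===== LEMMAS AND PROOFS =====

-- closed form of B's binary search on its literal tables: the decision tree the bisect loop traverses
set_option maxRecDepth 8000 in
lemma alt_closed (x : Int) : bmtc_fare_alt x =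
    ((if 16 < x then (if 24 < x then (if 28 < x then (if 30 < x then 32 else 30) else (if 26 < x then 30 else 30)) else (if 20 < x then (if 22 < x then 30 else 30) else (if 18 < x then 28 else 28))) else (if 8 < x then (if 12 < x then (if 14 < x then 28 else 24) else (if 10 < x then 24 else 23)) else (if 4 < x then (if 6 < x then 23 else 18) else (if 2 < x then 12 else 6)))) : Int) := by
  unfold bmtc_fare_alt
  norm_num
  repeat (rw [bisectLoop]; norm_num)
  split_ifs <;> first | omega | (norm_num; try omega)

-- ===== VERDICT (by name: the statement is the Claim_ definition above) =====
theorem bmtc_fare_spec : Claim_equal_bmtc_fare := by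
  intro x _
  unfold Spec_bmtc_fare bmtc_fare
  rw [alt_closed]
  simp only [fareLoop]
  by_cases h0 : x ≤ (2:Int)
  · rw [if_pos h0, if_neg (show ¬((16:Int) < x) by omega), if_neg (show ¬((8:Int) < x) by omega), if_neg (show ¬((4:Int) < x) by omega), if_neg (show ¬((2:Int) < x) by omega)]
  · rw [if_neg h0]
    by_cases h1 : x ≤ (4:Int)
    · rw [if_pos h1, if_neg (show ¬((16:Int) < x) by omega), if_neg (show ¬((8:Int) < x) by omega), if_neg (show ¬((4:Int) < x) by omega), if_pos (show (2:Int) < x by omega)]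
    · rw [if_neg h1]
      by_cases h2 : x ≤ (6:Int)
      · rw [if_pos h2, if_neg (show ¬((16:Int) < x) by omega), if_neg (show ¬((8:Int) < x) by omega), if_pos (show (4:Int) < x by omega), if_neg (show ¬((6:Int) < x) by omega)]
      · rw [if_neg h2]
        by_cases h3 : x ≤ (8:Int)
        · rw [if_pos h3, if_neg (show ¬((16:Int) < x) by omega), if_neg (show ¬((8:Int) < x) by omega), if_pos (show (4:Int) < x by omega), if_pos (show (6:Int) < x by omega)]
        · rw [if_neg h3]
          by_cases h4 : x ≤ (10:Int)
          · rw [if_pos h4, if_neg (show ¬((16:Int) < x) by omega), if_pos (show (8:Int) < x by omega), if_neg (show ¬((12:Int) < x) by omega), if_neg (show ¬((10:Int) < x) by omega)]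
          · rw [if_neg h4]
            by_cases h5 : x ≤ (12:Int)
            · rw [if_pos h5, if_neg (show ¬((16:Int) < x) by omega), if_pos (show (8:Int) < x by omega), if_neg (show ¬((12:Int) < x) by omega), if_pos (show (10:Int) < x by omega)]
            · rw [if_neg h5]
              by_cases h6 : x ≤ (14:Int)
              · rw [if_pos h6, if_neg (show ¬((16:Int) < x) by omega), if_pos (show (8:Int) < x by omega), if_pos (show (12:Int) < x by omega), if_neg (show ¬((14:Int) < x) by omega)]
              · rw [if_neg h6]
                by_cases h7 : x ≤ (16:Int)
                · rw [if_pos h7, if_neg (show ¬((16:Int) < x) by omega), if_pos (show (8:Int) < x by omega), if_pos (show (12:Int) < x by omega), if_pos (show (14:Int) < x by omega)]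
                · rw [if_neg h7]
                  by_cases h8 : x ≤ (18:Int)
                  · rw [if_pos h8, if_pos (show (16:Int) < x by omega), if_neg (show ¬((24:Int) < x) by omega), if_neg (show ¬((20:Int) < x) by omega), if_neg (show ¬((18:Int) < x) by omega)]
                  · rw [if_neg h8]
                    by_cases h9 : x ≤ (20:Int)
                    · rw [if_pos h9, if_pos (show (16:Int) < x by omega), if_neg (show ¬((24:Int) < x) by omega), if_neg (show ¬((20:Int) < x) by omega), if_pos (show (18:Int) < x by omega)]
                    · rw [if_neg h9]
                      by_cases h10 : x ≤ (22:Int)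
                      · rw [if_pos h10, if_pos (show (16:Int) < x by omega), if_neg (show ¬((24:Int) < x) by omega), if_pos (show (20:Int) < x by omega), if_neg (show ¬((22:Int) < x) by omega)]
                      · rw [if_neg h10]
                        by_cases h11 : x ≤ (24:Int)
                        · rw [if_pos h11, if_pos (show (16:Int) < x by omega), if_neg (show ¬((24:Int) < x) by omega), if_pos (show (20:Int) < x by omega), if_pos (show (22:Int) < x by omega)]
                        · rw [if_neg h11]
                          by_cases h12 : x ≤ (26:Int)
                          · rw [if_pos h12, if_pos (show (16:Int) < x by omega), if_pos (show (24:Int) < x by omega), if_neg (show ¬((28:Int) < x) by omega), if_neg (show ¬((26:Int) < x) by omega)]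
                          · rw [if_neg h12]
                            by_cases h13 : x ≤ (28:Int)
                            · rw [if_pos h13, if_pos (show (16:Int) < x by omega), if_pos (show (24:Int) < x by omega), if_neg (show ¬((28:Int) < x) by omega), if_pos (show (26:Int) < x by omega)]
                            · rw [if_neg h13]
                              by_cases h14 : x ≤ (30:Int)
                              · rw [if_pos h14, if_pos (show (16:Int) < x by omega), if_pos (show (24:Int) < x by omega), if_pos (show (28:Int) < x by omega), if_neg (show ¬((30:Int) < x) by omega)]
                              · rw [if_neg h14]
                                rw [if_pos (show (16:Int) < x by omega), if_pos (show (24:Int) < x by omega), if_pos (show (28:Int) < x by omega), if_pos (show (30:Int) < x by omega)]
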